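-- pv_equiv track=rewrite | github.com/ninepig/leecode_dd_2024 | zPrac/dp/linerDp/LisOfFinbonaacci873.py | lenLongestFibSubseqBF
-- ===== SOURCE A (Python) =====
-- from typing import List
--
-- def lenLongestFibSubseqBF(arr: List[int]) -> int:
--     # 暴力法
--     res = 0
--     size = len(arr)
--     for i in range(size):
--         for j in range(i + 1 ,size):
--             temp_size = 0
--             temp_i = i
--             temp_j = j
--             k = j + 1
--             while k < size:
--                 if arr[k] == arr[temp_j] + arr[temp_i]:
--                     temp_size += 1
--                     temp_i = temp_j
--                     temp_j = k
--                 k += 1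
--                 res = max(res,temp_size)
--
--     if res > 0:
--         return res + 2 # at least we have 2 for fibonacci
--     else:
--         return 0
-- ===== SOURCE B (Python) =====
-- def lenLongestFibSubseqBF(arr):
--     # O(n^2): scan j from right to left keeping d[v] = smallest index > j with
--     # arr[index] == v, and memoise f[(i, j)] = number of greedy extensions of the
--     # chain starting with indices i < j (A recomputes each chain by scanning).
--     n = len(arr)
--     d = {}
--     f = {}
--     best = 0
--     for j in range(n - 1, -1, -1):
--         for i in range(j):
--             k = d.get(arr[i] + arr[j])
--             val = 1 + f[(j, k)] if k is not None else 0
--             f[(i, j)] = val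
--             if val > best:
--                 best = val
--         d[arr[j]] = j
--     return best + 2 if best > 0 else 0
-- ===== Notes on version B (the rewrite author's own statement) =====
-- stated objective: faster
-- what changed: Replaces A's brute-force re-walk of every chain (for each pair a full O(n) scan) by a right-to-left DP: a hashmap from value to its nearest later index plus a memo table f[(i,j)] of chain extensions, so each pair is solved in O(1).
import Mathlib
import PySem

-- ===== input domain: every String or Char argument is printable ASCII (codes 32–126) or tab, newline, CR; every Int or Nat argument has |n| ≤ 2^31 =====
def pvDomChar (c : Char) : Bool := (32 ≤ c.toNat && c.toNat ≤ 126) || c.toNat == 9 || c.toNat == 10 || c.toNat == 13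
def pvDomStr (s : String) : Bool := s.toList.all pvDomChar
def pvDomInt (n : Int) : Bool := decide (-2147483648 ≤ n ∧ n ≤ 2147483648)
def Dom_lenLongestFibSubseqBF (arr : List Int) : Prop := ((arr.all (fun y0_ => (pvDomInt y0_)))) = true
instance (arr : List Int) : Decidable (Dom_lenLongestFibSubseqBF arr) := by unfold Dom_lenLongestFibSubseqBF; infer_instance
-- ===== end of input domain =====

-- B replaces A's per-pair O(n) chain re-scan by a right-to-left O(n^2) DP with a
-- value→nearest-later-index hashmap and a memo table of chain extensions (faster, asymptotic).

-- shared indexing helper: arr[i] for an index that is always in range in both programs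
def pvIdx (arr : List Int) (i : Nat) : Int := arr.getD i 0

-- ===== PORT A =====
-- the inner 'while k < size' loop; only res survives it
def lenAuxWhile (arr : List Int) (size : Nat) (tempSize : Int) (tempI tempJ k : Nat)
    (res : Int) : Int :=
  if k < size then
    if pvIdx arr k = pvIdx arr tempJ + pvIdx arr tempI then
      lenAuxWhile arr size (tempSize + 1) tempJ k (k + 1) (max res (tempSize + 1))
    else
      lenAuxWhile arr size tempSize tempI tempJ (k + 1) (max res tempSize)
  else res
termination_by size - k

def lenLongestFibSubseqBF (arr : List Int) : Int :=
  let size := arr.length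
  let res : Int := (List.range size).foldl (fun res i =>
    (List.range' (i + 1) (size - (i + 1))).foldl (fun res j =>
      lenAuxWhile arr size 0 i j (j + 1) res) res) 0
  if res > 0 then res + 2 else 0

-- ===== PORT B =====
-- one inner-loop iteration: body of 'for i in range(j)' (d is not modified there)
def pvBStep (arr : List Int) (d : PySem.Dict Int Nat) (j : Nat)
    (st : PySem.Dict (Nat × Nat) Int × Int) (i : Nat) : PySem.Dict (Nat × Nat) Int × Int :=
  let val : Int :=
    match d.get? (pvIdx arr i + pvIdx arr j) with
    | none => 0
    | some k => 1 + (st.1.get? (j, k)).getD 0   -- Python f[(j,k)]; the key is always present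
  (st.1.insert (i, j) val, if val > st.2 then val else st.2)

-- body of 'for j in range(n-1, -1, -1)'
def pvBOuter (arr : List Int)
    (st : PySem.Dict Int Nat × PySem.Dict (Nat × Nat) Int × Int) (j : Nat) :
    PySem.Dict Int Nat × PySem.Dict (Nat × Nat) Int × Int :=
  let fb := (List.range j).foldl (pvBStep arr st.1 j) (st.2.1, st.2.2)
  (st.1.insert (pvIdx arr j) j, fb.1, fb.2)

def lenLongestFibSubseqBF_alt (arr : List Int) : Int :=
  let n := arr.length
  let st := (List.range n).reverse.foldl (pvBOuter arr)
    (PySem.Dict.empty, PySem.Dict.empty, 0)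
  if st.2.2 > 0 then st.2.2 + 2 else 0

-- ===== PRECONDITION & SPEC =====
def Spec_lenLongestFibSubseqBF (arr : List Int) (out : Int) : Prop := out = lenLongestFibSubseqBF_alt arr
instance (arr : List Int) (out : Int) : Decidable (Spec_lenLongestFibSubseqBF arr out) := by unfold Spec_lenLongestFibSubseqBF; infer_instance

-- ===== CLAIM (what is proved, stated in full; the proofs are below) =====
def Claim_equal_lenLongestFibSubseqBF : Prop := ∀ (arr : List Int), Dom_lenLongestFibSubseqBF arr → Spec_lenLongestFibSubseqBF arr (lenLongestFibSubseqBF arr)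

-- ===== LEMMAS AND PROOFS =====

-- least index k' ≥ k with arr[k'] = v
def pvFirstFrom (arr : List Int) (v : Int) (k : Nat) : Option Nat :=
  if k < arr.length then
    (if pvIdx arr k = v then some k else pvFirstFrom arr v (k + 1))
  else none
termination_by arr.length - k

theorem pvFirstFrom_some {arr : List Int} {v : Int} {k k' : Nat}
    (h : pvFirstFrom arr v k = some k') :
    k ≤ k' ∧ k' < arr.length ∧ pvIdx arr k' = v := by
  induction k using pvFirstFrom.induct (arr := arr) (v := v) with
  | case1 k hk he =>
    rw [pvFirstFrom, if_pos hk, if_pos he] at h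
    cases h; exact ⟨le_refl _, hk, he⟩
  | case2 k hk he ih =>
    rw [pvFirstFrom, if_pos hk, if_neg he] at h
    have := ih h
    exact ⟨by omega, this.2.1, this.2.2⟩
  | case3 k hk =>
    rw [pvFirstFrom, if_neg hk] at h
    cases h

-- chain-count of A's greedy scan: from scan position k, with current pair values arr[i], arr[j]
def pvG (arr : List Int) (i j k : Nat) : Int :=
  if k < arr.length then
    (if pvIdx arr k = pvIdx arr j + pvIdx arr i then 1 + pvG arr j k (k + 1)
     else pvG arr i j (k + 1))
  else 0
termination_by arr.length - k

theorem pvG_nonneg (arr : List Int) (i j k : Nat) : 0 ≤ pvG arr i j k := by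
  induction i, j, k using pvG.induct (arr := arr) with
  | case1 i j k hk he ih => rw [pvG, if_pos hk, if_pos he]; omega
  | case2 i j k hk he ih => rw [pvG, if_pos hk, if_neg he]; exact ih
  | case3 i j k hk => rw [pvG, if_neg hk]

theorem pvG_first (arr : List Int) (i j k : Nat) :
    pvG arr i j k =
      match pvFirstFrom arr (pvIdx arr j + pvIdx arr i) k with
      | none => 0
      | some k' => 1 + pvG arr j k' (k' + 1) := by
  induction i, j, k using pvG.induct (arr := arr) with
  | case1 i j k hk he ih =>
    rw [pvG, if_pos hk, if_pos he, pvFirstFrom, if_pos hk, if_pos he]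
  | case2 i j k hk he ih =>
    rw [pvG, if_pos hk, if_neg he, pvFirstFrom, if_pos hk, if_neg he]; exact ih
  | case3 i j k hk =>
    rw [pvG, if_neg hk, pvFirstFrom, if_neg hk]

-- the value compared on both sides: chain extensions of the pair (i, j)
def pvV (arr : List Int) (p : Nat × Nat) : Int := pvG arr p.1 p.2 (p.2 + 1)

-- A's while loop computes max res (ts + pvG …)
theorem lenAuxWhile_eq (arr : List Int) (ts : Int) (i j k : Nat) (res : Int) (h : ts ≤ res) :
    lenAuxWhile arr arr.length ts i j k res = max res (ts + pvG arr i j k) := by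
  induction ts, i, j, k, res using lenAuxWhile.induct (arr := arr) (size := arr.length) with
  | case1 ts i j k res hk he ih =>
    have hg : pvG arr i j k = 1 + pvG arr j k (k + 1) := by rw [pvG, if_pos hk, if_pos he]
    rw [lenAuxWhile, if_pos hk, if_pos he, ih (le_max_right _ _), hg]
    have := pvG_nonneg arr j k (k + 1)
    omega
  | case2 ts i j k res hk he ih =>
    have hg : pvG arr i j k = pvG arr i j (k + 1) := by rw [pvG, if_pos hk, if_neg he]
    rw [lenAuxWhile, if_pos hk, if_neg he, ih (le_max_right _ _), hg]
    omega
  | case3 ts i j k res hk =>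
    rw [lenAuxWhile, if_neg hk, pvG, if_neg hk]
    omega

def pvStep (arr : List Int) (r : Int) (p : Nat × Nat) : Int := max r (pvV arr p)

def pvPairsA (arr : List Int) : List (Nat × Nat) :=
  (List.range arr.length).flatMap (fun i =>
    (List.range' (i + 1) (arr.length - (i + 1))).map (fun j => (i, j)))

def pvPairsB (_arr : List Int) (j0 : Nat) : List (Nat × Nat) :=
  (List.range j0).reverse.flatMap (fun j => (List.range j).map (fun i => (i, j)))

-- characterisation of a max-fold
theorem foldl_max_char (arr : List Int) (l : List (Nat × Nat)) (a : Int) :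
    a ≤ l.foldl (pvStep arr) a ∧
    (∀ p ∈ l, pvV arr p ≤ l.foldl (pvStep arr) a) ∧
    (l.foldl (pvStep arr) a = a ∨ ∃ p ∈ l, l.foldl (pvStep arr) a = pvV arr p) := by
  induction l generalizing a with
  | nil => simp
  | cons p l ih =>
    obtain ⟨h1, h2, h3⟩ := ih (pvStep arr a p)
    simp only [List.foldl_cons]
    refine ⟨le_trans (le_max_left _ _) h1, ?_, ?_⟩
    · intro q hq
      rcases List.mem_cons.mp hq with rfl | hq
      · exact le_trans (le_max_right _ _) h1
      · exact h2 q hq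
    · rcases h3 with h3 | ⟨q, hq, h3⟩
      · rcases max_choice a (pvV arr p) with hm | hm
        · exact Or.inl (by rw [h3]; exact hm)
        · exact Or.inr ⟨p, List.mem_cons_self .., by rw [h3]; exact hm⟩
      · exact Or.inr ⟨q, List.mem_cons_of_mem _ hq, h3⟩

theorem foldl_max_ext (arr : List Int) (l₁ l₂ : List (Nat × Nat)) (a : Int)
    (h : ∀ p, p ∈ l₁ ↔ p ∈ l₂) :
    l₁.foldl (pvStep arr) a = l₂.foldl (pvStep arr) a := by
  obtain ⟨a1, b1, c1⟩ := foldl_max_char arr l₁ a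
  obtain ⟨a2, b2, c2⟩ := foldl_max_char arr l₂ a
  apply le_antisymm
  · rcases c1 with hc | ⟨p, hp, hv⟩
    · rw [hc]; exact a2
    · rw [hv]; exact b2 p ((h p).mp hp)
  · rcases c2 with hc | ⟨p, hp, hv⟩
    · rw [hc]; exact a1
    · rw [hv]; exact b1 p ((h p).mpr hp)

theorem foldl_max_nonneg (arr : List Int) (l : List (Nat × Nat)) (a : Int) (h : 0 ≤ a) :
    0 ≤ l.foldl (pvStep arr) a :=
  le_trans h (foldl_max_char arr l a).1

-- A's inner j-loop is a max-fold over pairs (i, j)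
theorem A_inner (arr : List Int) (i : Nat) (l : List Nat) (res : Int) (h : 0 ≤ res) :
    l.foldl (fun r j => lenAuxWhile arr arr.length 0 i j (j + 1) r) res =
      (l.map (fun j => (i, j))).foldl (pvStep arr) res := by
  induction l generalizing res with
  | nil => rfl
  | cons j l ih =>
    simp only [List.foldl_cons, List.map_cons]
    rw [lenAuxWhile_eq arr 0 i j (j + 1) res h, zero_add]
    exact ih _ (le_trans h (le_max_left _ _))

-- A's double loop is a max-fold over its flat pair list
theorem A_outer (arr : List Int) (l : List Nat) (res : Int) (h : 0 ≤ res) :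
    l.foldl (fun res i =>
        (List.range' (i + 1) (arr.length - (i + 1))).foldl (fun res j =>
          lenAuxWhile arr arr.length 0 i j (j + 1) res) res) res =
      (l.flatMap (fun i =>
        (List.range' (i + 1) (arr.length - (i + 1))).map (fun j => (i, j)))).foldl
        (pvStep arr) res := by
  induction l generalizing res with
  | nil => rfl
  | cons i l ih =>
    simp only [List.foldl_cons, List.flatMap_cons, List.foldl_append]
    rw [A_inner arr i _ res h]
    exact ih _ (foldl_max_nonneg arr _ _ h)

theorem A_res_eq (arr : List Int) :
    lenLongestFibSubseqBF arr =
      (if (pvPairsA arr).foldl (pvStep arr) 0 > 0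
       then (pvPairsA arr).foldl (pvStep arr) 0 + 2 else 0) := by
  simp only [lenLongestFibSubseqBF]
  rw [A_outer arr _ 0 le_rfl]
  rfl

-- one B inner-loop step, rewritten with the memoised chain value
theorem pvBStep_eq (arr : List Int) (d : PySem.Dict Int Nat) (j i : Nat)
    (f : PySem.Dict (Nat × Nat) Int) (best : Int)
    (_hij : i < j) (_hj : j < arr.length)
    (hd : ∀ v, d.get? v = pvFirstFrom arr v (j + 1))
    (hf : ∀ q : Nat × Nat, j < q.2 → q.1 < q.2 → q.2 < arr.length →
      f.get? q = some (pvV arr q)) :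
    pvBStep arr d j (f, best) i = (f.insert (i, j) (pvV arr (i, j)), max best (pvV arr (i, j))) := by
  have hsum : pvIdx arr i + pvIdx arr j = pvIdx arr j + pvIdx arr i := by ring
  have hVij : pvV arr (i, j) =
      match pvFirstFrom arr (pvIdx arr j + pvIdx arr i) (j + 1) with
      | none => 0
      | some k' => 1 + pvG arr j k' (k' + 1) := pvG_first arr i j (j + 1)
  cases hdv : pvFirstFrom arr (pvIdx arr j + pvIdx arr i) (j + 1) with
  | none =>
    have hval : pvV arr (i, j) = 0 := by rw [hVij, hdv]
    simp only [pvBStep, hd, hsum, hdv, hval]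
    congr 1
    omega
  | some k =>
    obtain ⟨hk1, hk2, hk3⟩ := pvFirstFrom_some hdv
    have hfk := hf (j, k) (by omega) (by omega) hk2
    have hval : pvV arr (i, j) = 1 + pvV arr (j, k) := by
      rw [hVij, hdv]; rfl
    simp only [pvBStep, hd, hsum, hdv, hfk, Option.getD_some]
    rw [← hval]
    congr 1
    omega

-- B's inner loop: effect on the memo table and the running max
theorem B_inner (arr : List Int) (j : Nat) (hj : j < arr.length)
    (d : PySem.Dict Int Nat)
    (hd : ∀ v, d.get? v = pvFirstFrom arr v (j + 1))
    (l : List Nat) (f : PySem.Dict (Nat × Nat) Int) (best : Int)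
    (hl : ∀ i ∈ l, i < j)
    (hf : ∀ q : Nat × Nat, j < q.2 → q.1 < q.2 → q.2 < arr.length →
      f.get? q = some (pvV arr q)) :
    (∀ q : Nat × Nat, (l.foldl (pvBStep arr d j) (f, best)).1.get? q =
        if q.2 = j ∧ q.1 ∈ l then some (pvV arr q) else f.get? q) ∧
    (l.foldl (pvBStep arr d j) (f, best)).2 =
      (l.map (fun i => (i, j))).foldl (pvStep arr) best := by
  induction l generalizing f best with
  | nil => simp
  | cons i l ih =>
    have hij : i < j := hl i (List.mem_cons_self ..)
    simp only [List.foldl_cons, List.map_cons]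
    rw [pvBStep_eq arr d j i f best hij hj hd hf]
    have hf' : ∀ q : Nat × Nat, j < q.2 → q.1 < q.2 → q.2 < arr.length →
        (f.insert (i, j) (pvV arr (i, j))).get? q = some (pvV arr q) := by
      intro q h1 h2 h3
      rw [PySem.Dict.get?_insert_of_ne]
      · exact hf q h1 h2 h3
      · intro hq; rw [hq] at h1; omega
    obtain ⟨ih1, ih2⟩ := ih (f.insert (i, j) (pvV arr (i, j))) (max best (pvV arr (i, j)))
      (fun i hi => hl i (List.mem_cons_of_mem _ hi)) hf' 
    refine ⟨?_, ?_⟩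
    · intro q
      rw [ih1 q]
      by_cases h1 : q.2 = j ∧ q.1 ∈ l
      · rw [if_pos h1, if_pos ⟨h1.1, List.mem_cons_of_mem _ h1.2⟩]
      · rw [if_neg h1, PySem.Dict.get?_insert]
        by_cases h2 : q = (i, j)
        · rw [if_pos h2, if_pos ⟨by rw [h2], by rw [h2]; exact List.mem_cons_self ..⟩, h2]
        · rw [if_neg h2, if_neg]
          intro ⟨ha, hb⟩
          rcases List.mem_cons.mp hb with hc | hc
          · exact h2 (by obtain ⟨q1, q2⟩ := q; simp_all)
          · exact h1 ⟨ha, hc⟩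
    · rw [ih2]; rfl

-- B's outer loop invariant
theorem B_loop (arr : List Int) (j0 : Nat) (hj0 : j0 ≤ arr.length)
    (d : PySem.Dict Int Nat) (f : PySem.Dict (Nat × Nat) Int) (best : Int)
    (hd : ∀ v, d.get? v = pvFirstFrom arr v j0)
    (hf : ∀ q : Nat × Nat, j0 ≤ q.2 → q.1 < q.2 → q.2 < arr.length →
      f.get? q = some (pvV arr q)) :
    ((List.range j0).reverse.foldl (pvBOuter arr) (d, f, best)).2.2 =
      (pvPairsB arr j0).foldl (pvStep arr) best := by
  induction j0 generalizing d f best with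
  | zero => simp [pvPairsB]
  | succ j0 ih =>
    have hj : j0 < arr.length := by omega
    rw [List.range_succ, List.reverse_append]
    simp only [List.reverse_cons, List.reverse_nil, List.nil_append, List.singleton_append,
      List.foldl_cons]
    have hd' : ∀ v, d.get? v = pvFirstFrom arr v (j0 + 1) := hd
    have hf' : ∀ q : Nat × Nat, j0 < q.2 → q.1 < q.2 → q.2 < arr.length →
        f.get? q = some (pvV arr q) := fun q h1 h2 h3 => hf q (by omega) h2 h3
    obtain ⟨hB1, hB2⟩ := B_inner arr j0 hj d hd' (List.range j0) f best
      (fun i hi => List.mem_range.mp hi) hf'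
    have hstep : pvBOuter arr (d, f, best) j0 =
        (d.insert (pvIdx arr j0) j0,
         ((List.range j0).foldl (pvBStep arr d j0) (f, best)).1,
         ((List.range j0).foldl (pvBStep arr d j0) (f, best)).2) := rfl
    rw [hstep]
    rw [ih (by omega) _ _ _ ?_ ?_]
    · rw [hB2]
      have : pvPairsB arr (j0 + 1) =
          ((List.range j0).map (fun i => (i, j0))) ++ pvPairsB arr j0 := by
        simp [pvPairsB, List.range_succ]
      rw [this, List.foldl_append]
    · -- d invariant one step down
      intro v
      rw [PySem.Dict.get?_insert]
      rw [pvFirstFrom, if_pos hj]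
      by_cases hv : v = pvIdx arr j0
      · rw [if_pos hv, if_pos hv.symm]
      · rw [if_neg hv, if_neg (fun h => hv h.symm), hd]
    · -- f invariant one step down
      intro q h1 h2 h3
      rw [hB1 q]
      by_cases hq : q.2 = j0
      · rw [if_pos ⟨hq, List.mem_range.mpr (by omega)⟩]
      · rw [if_neg (fun h => hq h.1)]
        exact hf q (by omega) h2 h3

-- pair-list memberships agree
theorem mem_pairsA (arr : List Int) (p : Nat × Nat) :
    p ∈ pvPairsA arr ↔ p.1 < p.2 ∧ p.2 < arr.length := by
  obtain ⟨i, j⟩ := p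
  simp only [pvPairsA, List.mem_flatMap, List.mem_map, List.mem_range, List.mem_range'_1,
    Prod.mk.injEq]
  constructor
  · rintro ⟨a, ha, b, hb, rfl, rfl⟩
    constructor <;> omega
  · rintro ⟨h1, h2⟩
    exact ⟨i, by omega, j, ⟨by omega, by omega⟩, rfl, rfl⟩

theorem mem_pairsB (arr : List Int) (p : Nat × Nat) :
    p ∈ pvPairsB arr arr.length ↔ p.1 < p.2 ∧ p.2 < arr.length := by
  obtain ⟨i, j⟩ := p
  simp only [pvPairsB, List.mem_flatMap, List.mem_reverse, List.mem_map, List.mem_range,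
    Prod.mk.injEq]
  constructor
  · rintro ⟨b, hb, a, ha, rfl, rfl⟩
    exact ⟨ha, hb⟩
  · rintro ⟨h1, h2⟩
    exact ⟨j, h2, i, h1, rfl, rfl⟩

theorem B_res_eq (arr : List Int) :
    lenLongestFibSubseqBF_alt arr =
      (if (pvPairsB arr arr.length).foldl (pvStep arr) 0 > 0
       then (pvPairsB arr arr.length).foldl (pvStep arr) 0 + 2 else 0) := by
  simp only [lenLongestFibSubseqBF_alt]
  rw [B_loop arr arr.length le_rfl PySem.Dict.empty PySem.Dict.empty 0 ?_ ?_]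
  · intro v
    rw [PySem.Dict.get?_empty, pvFirstFrom, if_neg (by omega)]
  · intro q h1 h2 h3
    omega

-- ===== VERDICT (by name: the statement is the Claim_ definition above) =====
theorem lenLongestFibSubseqBF_spec : Claim_equal_lenLongestFibSubseqBF := by
  intro arr _
  unfold Spec_lenLongestFibSubseqBF
  rw [A_res_eq, B_res_eq]
  rw [foldl_max_ext arr (pvPairsA arr) (pvPairsB arr arr.length) 0
    (fun p => (mem_pairsA arr p).trans (mem_pairsB arr p).symm)]
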